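-- pv_equiv track=rewrite | github.com/sgagnonboncode/aoc2023 | src/solvers/day14.py | compute_north_load
-- ===== SOURCE A (Python) =====
-- def compute_north_load(grid: list[list[str]]) -> int:
--     north_load = 0
--     nb_rows = len(grid)
--     cur_row = 0
--     for row in grid:
--         north_load += sum([1 for c in row if c == "O"]) * (nb_rows - cur_row)
--         cur_row += 1
--
--     return north_load
-- ===== SOURCE B (Python) =====
-- def compute_north_load(grid: list[list[str]]) -> int:
--     running = 0
--     total = 0
--     for row in grid:
--         running += row.count("O")
--         total += running
--     return total
-- ===== Notes on version B (the rewrite author's own statement) =====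
-- stated objective: simpler
-- what changed: B replaces the index-weighted sum (count per row times distance from the bottom) by a running prefix count of 'O' rocks added on every row, using sum_i c_i*(N-i) = sum_j prefix_j; no row index or multiplication remains.
import Mathlib
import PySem

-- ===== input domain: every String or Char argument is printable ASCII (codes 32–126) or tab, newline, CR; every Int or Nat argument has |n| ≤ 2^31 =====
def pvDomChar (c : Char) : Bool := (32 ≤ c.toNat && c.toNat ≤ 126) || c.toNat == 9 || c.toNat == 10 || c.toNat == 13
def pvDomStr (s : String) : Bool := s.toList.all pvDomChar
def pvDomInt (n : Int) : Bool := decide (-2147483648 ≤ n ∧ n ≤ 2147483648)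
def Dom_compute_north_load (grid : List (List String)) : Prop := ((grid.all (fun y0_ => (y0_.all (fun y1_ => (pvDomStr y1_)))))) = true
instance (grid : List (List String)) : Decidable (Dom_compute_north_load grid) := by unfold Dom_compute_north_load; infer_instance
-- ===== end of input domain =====

-- B replaces the index-weighted per-row sum by a running prefix count of 'O' rocks
-- added on every row (simpler: no row index, no multiplication); return values proved equal.

-- ===== PORT A =====
-- north_load += sum([1 for c in row if c == "O"]) * (nb_rows - cur_row); cur_row += 1
def compute_north_load (grid : List (List String)) : Int :=
  let nb_rows : Int := grid.length
  let r := grid.foldl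
    (fun (s : Int × Int) row =>
      (s.1 + ((row.filter (fun c => c == "O")).map (fun _ => (1 : Int))).sum * (nb_rows - s.2),
       s.2 + 1))
    (0, 0)
  r.1

-- ===== PORT B =====
-- running += row.count("O"); total += running
def compute_north_load_alt (grid : List (List String)) : Int :=
  let r := grid.foldl
    (fun (s : Int × Int) row =>
      let running := s.1 + (PySem.List.count row "O" : Int)
      (running, s.2 + running))
    (0, 0)
  r.2

-- ===== PRECONDITION & SPEC =====
def Spec_compute_north_load (grid : List (List String)) (out : Int) : Prop := out = compute_north_load_alt grid
instance (grid : List (List String)) (out : Int) : Decidable (Spec_compute_north_load grid out) := by unfold Spec_compute_north_load; infer_instance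

-- ===== CLAIM (what is proved, stated in full; the proofs are below) =====
def Claim_equal_compute_north_load : Prop := ∀ (grid : List (List String)), Dom_compute_north_load grid → Spec_compute_north_load grid (compute_north_load grid)

-- ===== LEMMAS AND PROOFS =====

-- number of "O" cells in a row, as Int
def pvCnt (row : List String) : Int := (PySem.List.count row "O" : Int)

-- reference sum: S g k = cnt g₀ * k + cnt g₁ * (k-1) + …
def pvS : List (List String) → Int → Int
  | [], _ => 0
  | r :: rs, k => pvCnt r * k + pvS rs (k - 1)

lemma pvCnt_eq_sum (row : List String) :
    ((row.filter (fun c => c == "O")).map (fun _ => (1 : Int))).sum = pvCnt row := by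
  induction row with
  | nil => simp [pvCnt, PySem.List.count]
  | cons c cs ih =>
      simp only [pvCnt, PySem.List.count, List.count_cons, List.filter_cons] at *
      by_cases h : c == "O" <;> simp [h] at * <;> omega

lemma foldA_eq (g : List (List String)) (N : Int) : ∀ (nl cur : Int),
    (g.foldl
      (fun (s : Int × Int) row =>
        (s.1 + ((row.filter (fun c => c == "O")).map (fun _ => (1 : Int))).sum * (N - s.2),
         s.2 + 1))
      (nl, cur)).1 = nl + pvS g (N - cur) := by
  induction g with
  | nil => intro nl cur; simp [pvS]
  | cons r rs ih =>
      intro nl cur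
      rw [List.foldl_cons, ih]
      rw [show N - (cur + 1) = N - cur - 1 from by ring]
      simp only [pvS, pvCnt_eq_sum]
      ring

lemma foldB_eq (g : List (List String)) : ∀ (run tot : Int),
    (g.foldl
      (fun (s : Int × Int) row =>
        let running := s.1 + (PySem.List.count row "O" : Int)
        (running, s.2 + running))
      (run, tot)).2 = tot + run * g.length + pvS g g.length := by
  induction g with
  | nil => intro run tot; simp [pvS]
  | cons r rs ih =>
      intro run tot
      simp only [List.foldl_cons, ih, pvS, pvCnt, List.length_cons]
      push_cast
      ring

-- ===== VERDICT (by name: the statement is the Claim_ definition above) =====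
theorem compute_north_load_spec : Claim_equal_compute_north_load := by
  intro grid _
  unfold Spec_compute_north_load compute_north_load compute_north_load_alt
  simp only [foldA_eq, foldB_eq]
  ring_nf
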